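-- pv_equiv track=rewrite | github.com/TuiTenVan/Python_CODE_PTIT | ICPC0101.py | solve
-- ===== SOURCE A (Python) =====
-- def solve(n , arr):
--     stack = [];
--     for num in arr:
--         if stack and (stack[-1] + num) % 2 == 0:
--             stack.pop()
--         else:
--             stack.append(num)
--     return len(stack)
-- ===== SOURCE B (Python) =====
-- def solve(n, arr):
--     # Closed form via the infinite dihedral group: each element acts on the
--     # integers as the reflection x -> 2*(num % 2) - x.  Cancelling an adjacent
--     # same-parity pair composes a reflection with itself (the identity), so the
--     # product of all these maps is invariant under the stack reduction; the
--     # reduced stack's length is |c| if the product is the translation x -> x + c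
--     # and |c - 1| if it is the reflection x -> -x + c.  No stack, no branching.
--     s, c = 1, 0
--     for num in arr:
--         c += 2 * (num % 2) * s
--         s = -s
--     return abs(c) if s == 1 else abs(c - 1)
-- ===== Notes on version B (the rewrite author's own statement) =====
-- stated objective: alternative
-- what changed: Replaced the stack simulation by a closed form: each element acts on the integers as the reflection x -> 2*(num%2) - x, the product of these affine maps is invariant under the pair-cancellation, and the answer is read off the product (|c| for a translation x+c, |c-1| for a reflection -x+c); the loop is a branch-free arithmetic recurrence, no stack and no conditional.
import Mathlib
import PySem

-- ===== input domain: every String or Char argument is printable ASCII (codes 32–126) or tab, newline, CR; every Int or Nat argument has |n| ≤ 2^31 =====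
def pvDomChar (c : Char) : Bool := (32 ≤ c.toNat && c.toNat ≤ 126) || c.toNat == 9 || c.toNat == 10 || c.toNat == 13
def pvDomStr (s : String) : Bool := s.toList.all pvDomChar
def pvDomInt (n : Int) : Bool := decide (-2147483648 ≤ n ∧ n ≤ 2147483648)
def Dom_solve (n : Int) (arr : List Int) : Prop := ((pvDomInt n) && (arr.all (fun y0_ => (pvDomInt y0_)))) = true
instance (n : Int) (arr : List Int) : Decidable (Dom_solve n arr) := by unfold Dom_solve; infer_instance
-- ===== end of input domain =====

-- B replaces A's stack reduction by a branch-free closed form: each element acts on ZZ as the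
-- reflection x -> 2*(num%2) - x; the product of these maps is invariant under the reduction,
-- and the reduced stack's length is read off the product (objective: alternative).


-- ===== PORT A =====
-- one iteration of A's loop: 'if stack and (stack[-1] + num) % 2 == 0: stack.pop() else: stack.append(num)'
def pvStepA (stack : List Int) (num : Int) : List Int :=
  if stack ≠ [] ∧ PySem.Int.mod ((PySem.List.pyGet? stack (-1)).getD 0 + num) 2 = 0 then
    stack.dropLast
  else
    stack ++ [num]

def solve (n : Int) (arr : List Int) : Int :=
  ((arr.foldl pvStepA []).length : Int)

-- ===== PORT B =====
-- one iteration of B's loop over the state (s, c): 'c += 2 * (num % 2) * s; s = -s'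
def pvStepE (st : Int × Int) (num : Int) : Int × Int :=
  (-st.1, st.2 + 2 * PySem.Int.mod num 2 * st.1)

def solve_alt (n : Int) (arr : List Int) : Int :=
  let g := arr.foldl pvStepE ((1 : Int), (0 : Int))
  if g.1 = 1 then |g.2| else |g.2 - 1|

-- ===== PRECONDITION & SPEC =====
def Spec_solve (n : Int) (arr : List Int) (out : Int) : Prop := out = solve_alt n arr
instance (n : Int) (arr : List Int) (out : Int) : Decidable (Spec_solve n arr out) := by unfold Spec_solve; infer_instance

-- ===== CLAIM (what is proved, stated in full; the proofs are below) =====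
def Claim_equal_solve : Prop := ∀ (n : Int) (arr : List Int), Dom_solve n arr → Spec_solve n arr (solve n arr)

-- ===== LEMMAS AND PROOFS =====

theorem pv_mod2 (x : Int) : PySem.Int.mod x 2 = x % 2 :=
  PySem.Int.mod_eq_emod_of_pos (by norm_num)

-- the group element ("product of reflections") carried by a list
def pvElt (w : List Int) : Int × Int := w.foldl pvStepE ((1 : Int), (0 : Int))

-- the group multiplication (composition of affine maps x -> s*x + c)
def pvGmul (g h : Int × Int) : Int × Int := (g.1 * h.1, g.2 + g.1 * h.2)

theorem pv_fold_gmul (w : List Int) : ∀ g : Int × Int,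
    w.foldl pvStepE g = pvGmul g (pvElt w) := by
  induction w with
  | nil => intro g; simp [pvElt, pvGmul, List.foldl]
  | cons x rest ih =>
    intro g
    have h1 : pvStepE g x = pvGmul g (pvStepE (1, 0) x) := by
      simp only [pvStepE, pvGmul, Prod.mk.injEq]; constructor <;> ring
    simp only [pvElt, List.foldl]
    rw [ih (pvStepE g x), ih (pvStepE (1, 0) x), h1]
    simp only [pvGmul, Prod.mk.injEq]
    constructor <;> ring

-- A's loop step neither changes the group element of the stack nor breaks alternation
theorem pv_stepA_elt (S : List Int) (x : Int) :
    pvElt (pvStepA S x) = pvStepE (pvElt S) x := by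
  rcases List.eq_nil_or_concat S with hnil | ⟨l, a, rfl⟩
  · subst hnil
    simp [pvStepA, pvElt, List.foldl]
  · simp only [List.concat_eq_append]
    have htop : (PySem.List.pyGet? (l ++ [a]) (-1)).getD 0 = a := by
      simp [PySem.List.pyGet?, PySem.List.pyIdx?]
    have helt : pvElt (l ++ [a]) = pvStepE (pvElt l) a := by
      simp [pvElt, List.foldl_append]
    by_cases hc : PySem.Int.mod (a + x) 2 = 0
    · -- pop: the two equal-parity reflections compose to the identity
      have hA : pvStepA (l ++ [a]) x = l := by
        simp only [pvStepA, htop]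
        rw [if_pos ⟨by simp, hc⟩]
        simp
      have hpar : PySem.Int.mod a 2 = PySem.Int.mod x 2 := by
        rw [pv_mod2] at hc ⊢; rw [pv_mod2]; omega
      rw [hA, helt]
      simp only [pvStepE, hpar]
      rw [Prod.ext_iff]
      constructor <;> ring
    · -- push
      have hA : pvStepA (l ++ [a]) x = (l ++ [a]) ++ [x] := by
        simp only [pvStepA, htop]
        rw [if_neg (fun hcond => hc hcond.2)]
      rw [hA]
      simp [pvElt, List.foldl_append]

theorem pv_invariant (arr : List Int) : ∀ S : List Int,
    pvElt (arr.foldl pvStepA S) = arr.foldl pvStepE (pvElt S) := by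
  induction arr with
  | nil => intro S; rfl
  | cons x rest ih =>
    intro S
    simp only [List.foldl]
    rw [ih (pvStepA S x), pv_stepA_elt]

-- A's stack always has alternating parities
theorem pv_stepA_chain (S : List Int) (x : Int)
    (h : List.IsChain (fun a b => a % 2 ≠ b % 2) S) :
    List.IsChain (fun a b => a % 2 ≠ b % 2) (pvStepA S x) := by
  rcases List.eq_nil_or_concat S with hnil | ⟨l, a, rfl⟩
  · subst hnil; simp [pvStepA]
  · simp only [List.concat_eq_append] at h ⊢
    have htop : (PySem.List.pyGet? (l ++ [a]) (-1)).getD 0 = a := by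
      simp [PySem.List.pyGet?, PySem.List.pyIdx?]
    by_cases hc : PySem.Int.mod (a + x) 2 = 0
    · have hA : pvStepA (l ++ [a]) x = l := by
        simp only [pvStepA, htop]
        rw [if_pos ⟨by simp, hc⟩]
        simp
      rw [hA]
      exact h.left_of_append
    · have hA : pvStepA (l ++ [a]) x = (l ++ [a]) ++ [x] := by
        simp only [pvStepA, htop]
        rw [if_neg (fun hcond => hc hcond.2)]
      rw [hA, List.isChain_append]
      refine ⟨h, by simp, ?_⟩
      intro y hy z hz
      simp at hy hz
      subst hy; subst hz
      rw [pv_mod2] at hc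
      omega

theorem pv_chain_stack (arr : List Int) : ∀ S : List Int,
    List.IsChain (fun a b => a % 2 ≠ b % 2) S →
    List.IsChain (fun a b => a % 2 ≠ b % 2) (arr.foldl pvStepA S) := by
  induction arr with
  | nil => intro S h; exact h
  | cons x rest ih => intro S h; exact ih _ (pv_stepA_chain S x h)

-- the group element of an alternating list, in closed form over (length, parity of head)
theorem pv_elt_alt (S : List Int) (h : List.IsChain (fun a b => a % 2 ≠ b % 2) S) :
    pvElt S = (if (S.length : Int) % 2 = 0 then 1 else -1,
               (2 * ((S.headD 0) % 2) - 1) * (S.length : Int) + (S.length : Int) % 2) := by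
  induction S with
  | nil => simp [pvElt, List.foldl]
  | cons p rest ih =>
    have hrest : List.IsChain (fun a b => a % 2 ≠ b % 2) rest := h.tail
    have hElt : pvElt (p :: rest) = pvGmul (pvStepE (1, 0) p) (pvElt rest) := by
      simp only [pvElt, List.foldl]
      rw [pv_fold_gmul]
      rfl
    rw [hElt, ih hrest]
    have hp2 : p % 2 = 0 ∨ p % 2 = 1 := Int.emod_two_eq p
    rcases rest with _ | ⟨q, rest'⟩
    · simp only [List.length_nil, List.headD]
      rcases hp2 with hp | hp <;>
        simp [pvGmul, pvStepE, hp] <;> ring_nf <;> omega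
    · have hq : q % 2 = 1 - p % 2 := by
        have hne : p % 2 ≠ q % 2 := List.isChain_cons_cons.mp h |>.1
        have hq2 : q % 2 = 0 ∨ q % 2 = 1 := Int.emod_two_eq q
        omega
      have hR0 : 0 ≤ ((rest'.length : Nat) : Int) := by positivity
      simp only [List.headD, List.length_cons, pvGmul, pvStepE, pv_mod2, hq, Prod.mk.injEq]
      push_cast
      rcases hp2 with hp | hp <;> rw [hp] <;> norm_num <;>
        constructor <;> (try split_ifs) <;> (try ring_nf) <;> omega

-- ===== VERDICT (by name: the statement is the Claim_ definition above) =====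
theorem solve_spec : Claim_equal_solve := by
  intro n arr _
  unfold Spec_solve solve solve_alt
  set stack := arr.foldl pvStepA [] with hstack
  have hch : List.IsChain (fun a b => a % 2 ≠ b % 2) stack :=
    pv_chain_stack arr [] (by simp)
  have hinv : pvElt stack = arr.foldl pvStepE (1, 0) := by
    rw [hstack, pv_invariant arr []]; rfl
  rw [← hinv, pv_elt_alt stack hch]
  have hf : (stack.headD 0) % 2 = 0 ∨ (stack.headD 0) % 2 = 1 := Int.emod_two_eq _
  set L : Int := (stack.length : Int) with hLdef
  have hL0 : 0 ≤ L := by positivity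
  rcases Int.emod_two_eq L with hLp | hLp <;> rcases hf with hf | hf <;>
    simp only [hf, hLp] <;> norm_num <;>
    exact (abs_of_nonneg hL0).symm
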